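-- pv_equiv track=rewrite | github.com/AlessandroPoggiali/Quantum-oblivious-trees | test.py | count_classical_params
-- ===== SOURCE A (Python) =====
-- def count_classical_params(d: int, use_bias: str, hidden_layers: int, hidden_size: int) -> int:
--     """Count parameters in classical threshold module"""
--     if hidden_layers < 1:
--         # Linear: 1*d + bias
--         return d + (1 if use_bias == 'y' else 0) * d  # Add bias parameters if used
--     else:
--         # First layer: 1*hidden_size + bias
--         params = hidden_size + (1 if use_bias == 'y' else 0) * hidden_size  # Add bias parameters if used
--         # Hidden layers: hidden_size*hidden_size + bias each
--         for _ in range(hidden_layers - 1):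
--             params += hidden_size * hidden_size + (1 if use_bias == 'y' else 0) * hidden_size
--         # Output layer: hidden_size*d + d
--         params += hidden_size * d + (1 if use_bias == 'y' else 0) * d  # Add bias parameters if used
--         return params
-- ===== SOURCE B (Python) =====
-- def count_classical_params(d: int, use_bias: str, hidden_layers: int, hidden_size: int) -> int:
--     """Closed-form parameter count: no loop over the hidden layers."""
--     b = 1 if use_bias == 'y' else 0
--     if hidden_layers < 1:
--         return d + b * d
--     return (hidden_size + b * hidden_size
--             + (hidden_layers - 1) * (hidden_size * hidden_size + b * hidden_size)
--             + hidden_size * d + b * d)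
-- ===== Notes on version B (the rewrite author's own statement) =====
-- stated objective: faster
-- what changed: Replaces the per-hidden-layer accumulation loop with a closed-form formula multiplying the constant per-layer cost by hidden_layers-1.
import Mathlib
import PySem

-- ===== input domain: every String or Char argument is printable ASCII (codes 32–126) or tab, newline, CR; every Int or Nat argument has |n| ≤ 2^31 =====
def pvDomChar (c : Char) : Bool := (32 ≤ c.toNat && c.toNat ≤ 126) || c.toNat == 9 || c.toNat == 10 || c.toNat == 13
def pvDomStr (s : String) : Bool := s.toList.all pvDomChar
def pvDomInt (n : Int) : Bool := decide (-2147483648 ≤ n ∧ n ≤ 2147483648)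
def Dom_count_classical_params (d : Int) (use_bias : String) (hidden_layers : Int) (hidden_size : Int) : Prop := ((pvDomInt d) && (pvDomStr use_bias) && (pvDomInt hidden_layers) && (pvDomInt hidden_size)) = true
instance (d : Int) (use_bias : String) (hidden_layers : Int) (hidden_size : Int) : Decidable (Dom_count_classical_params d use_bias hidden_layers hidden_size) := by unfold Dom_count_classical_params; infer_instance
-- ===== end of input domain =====

-- ===== PORT A =====
def count_classical_params (d : Int) (use_bias : String) (hidden_layers : Int) (hidden_size : Int) : Int :=
  if hidden_layers < 1 then
    d + (if use_bias == "y" then 1 else 0) * d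
  else
    let params := hidden_size + (if use_bias == "y" then 1 else 0) * hidden_size
    let params := (PySem.List.pyRange 0 (hidden_layers - 1) 1).foldl
      (fun acc _ => acc + (hidden_size * hidden_size + (if use_bias == "y" then 1 else 0) * hidden_size)) params
    params + (hidden_size * d + (if use_bias == "y" then 1 else 0) * d)

-- ===== PORT B =====
-- B: closed form, no loop (faster in a timing run: O(1) vs O(hidden_layers))
def count_classical_params_alt (d : Int) (use_bias : String) (hidden_layers : Int) (hidden_size : Int) : Int :=
  let b : Int := if use_bias == "y" then 1 else 0
  if hidden_layers < 1 then
    d + b * d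
  else
    hidden_size + b * hidden_size
      + (hidden_layers - 1) * (hidden_size * hidden_size + b * hidden_size)
      + hidden_size * d + b * d

-- ===== PRECONDITION & SPEC =====
def Spec_count_classical_params (d : Int) (use_bias : String) (hidden_layers : Int) (hidden_size : Int) (out : Int) : Prop := out = count_classical_params_alt d use_bias hidden_layers hidden_size
instance (d : Int) (use_bias : String) (hidden_layers : Int) (hidden_size : Int) (out : Int) : Decidable (Spec_count_classical_params d use_bias hidden_layers hidden_size out) := by unfold Spec_count_classical_params; infer_instance

-- ===== CLAIM (what is proved, stated in full; the proofs are below) =====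
def Claim_equal_count_classical_params : Prop := ∀ (d : Int) (use_bias : String) (hidden_layers : Int) (hidden_size : Int), Dom_count_classical_params d use_bias hidden_layers hidden_size → Spec_count_classical_params d use_bias hidden_layers hidden_size (count_classical_params d use_bias hidden_layers hidden_size)

-- ===== LEMMAS AND PROOFS =====

-- ===== VERDICT (by name: the statement is the Claim_ definition above) =====
theorem foldl_const_add (l : List Int) (c : Int) : ∀ init : Int,
    l.foldl (fun acc _ => acc + c) init = init + l.length * c := by
  induction l with
  | nil => intro init; simp
  | cons x xs ih => intro init; simp [List.foldl, ih]; ring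

theorem count_classical_params_spec : Claim_equal_count_classical_params := by
  intro d ub hl hs _
  unfold Spec_count_classical_params count_classical_params count_classical_params_alt
  by_cases h : hl < 1
  · simp [h]
  · simp only [h]
    rw [foldl_const_add, PySem.List.length_pyRange_one]
    have : ((hl - 1 - 0).toNat : Int) = hl - 1 := by omega
    push_cast [this]
    ring
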